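-- pv_equiv track=rewrite | github.com/shlyapp/ege-informatika | udgu/2/20.py | F
-- ===== SOURCE A (Python) =====
-- def F(x):
--     a = 0
--     b = 0
--     while x > 0:
--         a = a + 1
--         b = b + (x % 10)
--         x = x // 10
--     return (a, b)
-- ===== SOURCE B (Python) =====
-- def F(x):
--     if x <= 0:
--         return (0, 0)
--     s = str(x)
--     return (len(s), sum(int(c) for c in s))
-- ===== Notes on version B (the rewrite author's own statement) =====
-- stated objective: idiomatic
-- what changed: replaces the arithmetic digit-extraction loop (% 10, // 10 with running accumulators) by iterating over the characters of the decimal string str(x), returning its length and the sum of its digit characters, with an explicit guard for non-positive arguments matching A's empty-loop result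
import Mathlib
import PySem

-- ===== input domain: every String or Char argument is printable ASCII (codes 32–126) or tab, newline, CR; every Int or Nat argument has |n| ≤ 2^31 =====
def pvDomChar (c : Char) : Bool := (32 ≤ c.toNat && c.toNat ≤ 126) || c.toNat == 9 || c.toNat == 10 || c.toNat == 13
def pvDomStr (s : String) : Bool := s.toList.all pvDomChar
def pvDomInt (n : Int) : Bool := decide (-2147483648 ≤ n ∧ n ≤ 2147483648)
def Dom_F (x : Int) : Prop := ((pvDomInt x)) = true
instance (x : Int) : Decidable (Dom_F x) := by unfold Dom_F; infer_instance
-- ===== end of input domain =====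

-- B replaces A's %10,//10 digit-extraction loop by iterating over the characters of str(x)
-- (idiomatic; same cost; (0,0) kept for x <= 0 where A's loop never runs).

-- ===== PORT A =====
-- the while loop of A: state (x, a, b), one call per iteration
def F.loop (x a b : Int) : Int × Int :=
  if h : 0 < x then
    F.loop (PySem.Int.floordiv x 10) (a + 1) (b + PySem.Int.mod x 10)
  else
    (a, b)
termination_by x.toNat
decreasing_by
  rw [PySem.Int.floordiv_eq_ediv_of_pos (by norm_num)]
  omega

def F (x : Int) : Int × Int := F.loop x 0 0

-- ===== PORT B =====
-- int(c) for a single character: PySem.Int.ofChars? [c] (exact: int raises nowhere here since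
-- str(x) of a positive x contains only digit characters, so getD's default is never used)
def F_alt.digit (c : Char) : Int := (PySem.Int.ofChars? [c]).getD 0

def F_alt (x : Int) : Int × Int :=
  if x ≤ 0 then (0, 0)
  else
    -- s = str(x); toChars x = (PySem.Int.toStr x).toList, the character list of str(x)
    let s := PySem.Int.toChars x
    ((s.length : Int), (s.map F_alt.digit).sum)

-- ===== PRECONDITION & SPEC =====
def Spec_F (x : Int) (out : Int × Int) : Prop := out = F_alt x
instance (x : Int) (out : Int × Int) : Decidable (Spec_F x out) := by unfold Spec_F; infer_instance

-- ===== CLAIM (what is proved, stated in full; the proofs are below) =====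
def Claim_equal_F : Prop := ∀ (x : Int), Dom_F x → Spec_F x (F x)

-- ===== LEMMAS AND PROOFS =====

-- the decimal character list of a positive Nat, by the same recursion Nat.toDigits performs
def repC (n : Nat) : List Char :=
  if h : n < 10 then [Nat.digitChar n]
  else repC (n / 10) ++ [Nat.digitChar (n % 10)]
termination_by n
decreasing_by omega

lemma repC_of_ge (n : Nat) (h : ¬ n < 10) :
    repC n = repC (n / 10) ++ [Nat.digitChar (n % 10)] := by
  rw [repC, dif_neg h]

lemma toDigitsCore_eq_repC :
    ∀ (f n : Nat) (acc : List Char), n < f →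
      Nat.toDigitsCore 10 f n acc = repC n ++ acc := by
  intro f
  induction f with
  | zero => intro n acc h; omega
  | succ f ih =>
    intro n acc h
    rw [Nat.toDigitsCore]
    by_cases h10 : n / 10 = 0
    · simp only [h10]
      rw [repC]
      have hn : n < 10 := by omega
      rw [dif_pos hn]
      have : n % 10 = n := Nat.mod_eq_of_lt hn
      simp [this]
    · rw [if_neg h10, ih (n / 10) _ (by omega), repC_of_ge n (by omega)]
      simp

lemma toDigits_eq_repC (n : Nat) : Nat.toDigits 10 n = repC n := by
  have := toDigitsCore_eq_repC (n + 1) n [] (by omega)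
  simpa [Nat.toDigits] using this

lemma digit_digitChar (d : Nat) (hd : d < 10) :
    F_alt.digit (Nat.digitChar d) = (d : Int) := by
  interval_cases d <;> decide

lemma loop_eq_repC :
    ∀ (n : Nat), 0 < n → ∀ (a b : Int),
      F.loop (n : Int) a b =
        (a + ((repC n).length : Int), b + ((repC n).map F_alt.digit).sum) := by
  intro n
  induction n using Nat.strong_induction_on with
  | _ n ih =>
    intro hn a b
    rw [F.loop, dif_pos (by exact_mod_cast hn)]
    have hdiv : PySem.Int.floordiv (n : Int) 10 = ((n / 10 : Nat) : Int) := by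
      exact_mod_cast PySem.Int.floordiv_natCast n 10
    have hmod : PySem.Int.mod (n : Int) 10 = ((n % 10 : Nat) : Int) := by
      exact_mod_cast PySem.Int.mod_natCast n 10
    rw [hdiv, hmod]
    by_cases h10 : n < 10
    · have h0 : n / 10 = 0 := by omega
      have hmn : n % 10 = n := Nat.mod_eq_of_lt h10
      rw [h0, F.loop, dif_neg (by norm_num)]
      rw [repC, dif_pos h10]
      simp [digit_digitChar n h10, hmn]
    · rw [repC_of_ge n h10, ih (n / 10) (by omega) (by omega)]
      have hlt : n % 10 < 10 := Nat.mod_lt _ (by omega)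
      simp only [List.map_append, List.sum_append, List.length_append, List.map_cons,
        List.map_nil, List.sum_cons, List.sum_nil, List.length_cons, List.length_nil,
        digit_digitChar _ hlt]
      rw [Prod.mk.injEq]
      constructor <;> push_cast <;> ring

lemma toChars_of_pos (x : Int) (hx : 0 < x) :
    PySem.Int.toChars x = repC x.toNat := by
  rw [PySem.Int.toChars, if_neg (by omega), toDigits_eq_repC]

-- ===== VERDICT (by name: the statement is the Claim_ definition above) =====
theorem F_spec : Claim_equal_F := by
  intro x _
  unfold Spec_F F F_alt
  by_cases hx : x ≤ 0
  · rw [F.loop, dif_neg (by omega), if_pos hx]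
  · have hx' : 0 < x := by omega
    rw [if_neg hx]
    have hcast : x = ((x.toNat : Nat) : Int) := by omega
    rw [toChars_of_pos x hx']
    conv_lhs => rw [hcast]
    rw [loop_eq_repC x.toNat (by omega) 0 0]
    simp
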